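-- pv_equiv track=rewrite | github.com/dingwan0331/100-algorithm | 프로그래머스/lv0/120876. 겹치는 선분의 길이/겹치는 선분의 길이.py | solution
-- ===== SOURCE A (Python) =====
-- def solution(lines):
--     answer = set()
--     for i in range(len(lines)-1):
--         a = set(range(lines[i][0],lines[i][1]))
--         for j in range(i+1,len(lines)):
--             b = set(range(lines[j][0],lines[j][1]))
--             answer.update(a&b)
--     return len(answer)
-- ===== SOURCE B (Python) =====
-- def solution(lines):
--     # sweep over segment endpoints: coverage changes only there;
--     # add the span between consecutive events while coverage >= 2
--     events = []
--     for seg in lines: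
--         if seg[0] < seg[1]:
--             events.append((seg[0], 1))
--             events.append((seg[1], -1))
--     events.sort()
--     total = 0
--     cov = 0
--     prev = 0  # only read once cov >= 2, i.e. after at least one event
--     for pos, delta in events:
--         if cov >= 2:
--             total += pos - prev
--         cov += delta
--         prev = pos
--     return total
-- ===== Notes on version B (the rewrite author's own statement) =====
-- stated objective: faster
-- what changed: Instead of materialising every pairwise range-set intersection and taking their union (O(n^2) pairs, each building per-point sets), B sorts the 2n segment endpoints once and sweeps them, summing the spans where running coverage is >= 2.
-- outside the precondition, e.g. on solution([[5]]): A returns 0, B raises IndexError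
import Mathlib
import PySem

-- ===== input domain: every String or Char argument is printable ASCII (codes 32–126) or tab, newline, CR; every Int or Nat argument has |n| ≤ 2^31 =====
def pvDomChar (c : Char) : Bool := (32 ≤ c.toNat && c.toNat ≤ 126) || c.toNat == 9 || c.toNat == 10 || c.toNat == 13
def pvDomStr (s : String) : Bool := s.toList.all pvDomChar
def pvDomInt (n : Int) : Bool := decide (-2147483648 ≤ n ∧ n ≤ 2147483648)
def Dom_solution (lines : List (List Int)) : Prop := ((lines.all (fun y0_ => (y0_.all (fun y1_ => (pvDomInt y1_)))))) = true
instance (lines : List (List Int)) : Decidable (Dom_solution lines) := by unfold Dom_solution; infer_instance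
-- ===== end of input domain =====

-- B replaces A's pairwise set intersections by a single sweep over the sorted
-- segment endpoints, summing the spans where coverage is at least 2 (objective: faster).

-- ===== PORT A =====
-- seg[0] / seg[1] (shared by both ports; defined under Pre_solution)
def segLo (seg : List Int) : Int := PySem.List.pyGetD seg 0 0
def segHi (seg : List Int) : Int := PySem.List.pyGetD seg 1 0

def solution (lines : List (List Int)) : Int :=
  let n : Int := (lines.length : Int)
  let answer : PySem.Set Int :=
    (PySem.List.pyRange 0 (n - 1) 1).foldl (fun answer i =>
      let li := PySem.List.pyGetD lines i []
      let a : PySem.Set Int := PySem.Set.ofList (PySem.List.pyRange (segLo li) (segHi li) 1)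
      (PySem.List.pyRange (i + 1) n 1).foldl (fun answer j =>
        let lj := PySem.List.pyGetD lines j []
        let b : PySem.Set Int := PySem.Set.ofList (PySem.List.pyRange (segLo lj) (segHi lj) 1)
        PySem.Set.update answer (PySem.Set.inter a b)) answer) PySem.Set.empty
  (PySem.Set.len answer : Int)

-- ===== PORT B =====
def solution_alt (lines : List (List Int)) : Int :=
  let events : List (Int × Int) :=
    lines.foldl (fun events seg =>
      if segLo seg < segHi seg then
        events ++ [(segLo seg, 1)] ++ [(segHi seg, -1)]
      else events) []
  -- events.sort(): Python's lexicographic tuple sort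
  let events := PySem.List.sorted2 events (·.1) (·.2) false
  -- state (total, cov, prev); prev starts at 0, read only once cov ≥ 2
  let res := events.foldl (fun (s : Int × Int × Int) e =>
      (if 2 ≤ s.2.1 then s.1 + (e.1 - s.2.2) else s.1, s.2.1 + e.2, e.1)) (0, 0, 0)
  res.1

-- ===== PRECONDITION & SPEC =====
-- Pre_ excludes inner lists with fewer than two entries: there Python A raises
-- IndexError, except when a single such list is never indexed (lines of length 1),
-- where B's natural per-segment pass still raises.
def Pre_solution (lines : List (List Int)) : Prop := ∀ seg ∈ lines, 2 ≤ seg.length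
instance (lines : List (List Int)) : Decidable (Pre_solution lines) := by unfold Pre_solution; infer_instance
def pvWitness_solution : List (List Int) := [[0, 2], [1, 3]]

def Spec_solution (lines : List (List Int)) (out : Int) : Prop := out = solution_alt lines
instance (lines : List (List Int)) (out : Int) : Decidable (Spec_solution lines out) := by unfold Spec_solution; infer_instance

-- ===== CLAIM (what is proved, stated in full; the proofs are below) =====
def Claim_equal_solution : Prop := ∀ (lines : List (List Int)), Dom_solution lines → Pre_solution lines → Spec_solution lines (solution lines)

-- ===== LEMMAS AND PROOFS =====

-- all covered unit points, with multiplicity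
def pvPts (lines : List (List Int)) : List Int :=
  lines.flatMap (fun seg => PySem.List.pyRange (segLo seg) (segHi seg) 1)

-- does seg cover x?
def pvCover (x : Int) (seg : List Int) : Bool := decide (segLo seg ≤ x ∧ x < segHi seg)

lemma nodup_pyRange_one (a b : Int) : (PySem.List.pyRange a b 1).Nodup := by
  rw [PySem.List.pyRange_of_pos a b (by norm_num)]
  exact (List.nodup_range).map (fun x y h => by omega)

lemma count_pvPts (lines : List (List Int)) (x : Int) :
    (pvPts lines).count x = lines.countP (pvCover x) := by
  induction lines with
  | nil => rfl
  | cons seg t ih =>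
    simp only [pvPts, List.flatMap_cons, List.count_append, List.countP_cons, pvCover] at *
    rw [ih]
    by_cases h : segLo seg ≤ x ∧ x < segHi seg
    · have hm : x ∈ PySem.List.pyRange (segLo seg) (segHi seg) 1 :=
        PySem.List.mem_pyRange_one.mpr h
      have h1 : (PySem.List.pyRange (segLo seg) (segHi seg) 1).count x = 1 := by
        have := List.nodup_iff_count_le_one.mp (nodup_pyRange_one (segLo seg) (segHi seg)) x
        have := List.count_pos_iff.mpr hm
        omega
      simp [h, h1]; omega
    · have hm : x ∉ PySem.List.pyRange (segLo seg) (segHi seg) 1 := by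
        intro hx; exact h (PySem.List.mem_pyRange_one.mp hx)
      simp [h, List.count_eq_zero_of_not_mem hm]

-- generic membership / nodup invariants for A's update loops
lemma mem_foldl_body {β : Type} (body : PySem.Set Int → β → PySem.Set Int) (P : β → Int → Prop)
    (h : ∀ s i y, y ∈ body s i ↔ y ∈ s ∨ P i y) :
    ∀ (l : List β) (init : PySem.Set Int) (y : Int),
      y ∈ l.foldl body init ↔ y ∈ init ∨ ∃ i ∈ l, P i y := by
  intro l
  induction l with
  | nil => simp
  | cons a t ih =>
    intro init y
    simp only [List.foldl_cons, ih, h, List.mem_cons]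
    constructor
    · rintro ((hy | hp) | ⟨i, hi, hp⟩)
      · exact Or.inl hy
      · exact Or.inr ⟨a, Or.inl rfl, hp⟩
      · exact Or.inr ⟨i, Or.inr hi, hp⟩
    · rintro (hy | ⟨i, (rfl | hi), hp⟩)
      · exact Or.inl (Or.inl hy)
      · exact Or.inl (Or.inr hp)
      · exact Or.inr ⟨i, hi, hp⟩

lemma nodup_foldl_body {β : Type} (body : PySem.Set Int → β → PySem.Set Int)
    (h : ∀ s i, s.Nodup → (body s i).Nodup) :
    ∀ (l : List β) (init : PySem.Set Int), init.Nodup → (l.foldl body init).Nodup := by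
  intro l
  induction l with
  | nil => intro init h0; exact h0
  | cons a t ih => intro init h0; exact ih _ (h _ _ h0)

def pvRng (lines : List (List Int)) (i : Int) : List Int :=
  PySem.List.pyRange (segLo (PySem.List.pyGetD lines i [])) (segHi (PySem.List.pyGetD lines i [])) 1

lemma mem_pvRng (lines : List (List Int)) (i : Int) (hi : 0 ≤ i) (x : Int) :
    x ∈ pvRng lines i ↔ pvCover x (lines.getD i.toNat []) = true := by
  unfold pvRng pvCover
  rw [PySem.List.pyGetD_of_nonneg _ _ hi]
  simp [PySem.List.mem_pyRange_one]

-- A's answer set: membership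
lemma mem_answer (lines : List (List Int)) (x : Int) :
    (x ∈ (PySem.List.pyRange 0 ((lines.length : Int) - 1) 1).foldl (fun answer i =>
      let li := PySem.List.pyGetD lines i []
      let a : PySem.Set Int := PySem.Set.ofList (PySem.List.pyRange (segLo li) (segHi li) 1)
      (PySem.List.pyRange (i + 1) (lines.length : Int) 1).foldl (fun answer j =>
        let lj := PySem.List.pyGetD lines j []
        let b : PySem.Set Int := PySem.Set.ofList (PySem.List.pyRange (segLo lj) (segHi lj) 1)
        PySem.Set.update answer (PySem.Set.inter a b)) answer) PySem.Set.empty) ↔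
    (∃ p q : Nat, p < q ∧ q < lines.length ∧
      pvCover x (lines.getD p []) = true ∧ pvCover x (lines.getD q []) = true) := by
  have houter := mem_foldl_body
    (fun answer i =>
      (PySem.List.pyRange (i + 1) (lines.length : Int) 1).foldl (fun answer j =>
        PySem.Set.update answer
          (PySem.Set.inter (PySem.Set.ofList (pvRng lines i)) (PySem.Set.ofList (pvRng lines j)))) answer)
    (fun i y => ∃ j ∈ PySem.List.pyRange (i + 1) (lines.length : Int) 1,
      y ∈ PySem.Set.inter (PySem.Set.ofList (pvRng lines i)) (PySem.Set.ofList (pvRng lines j)))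
    (fun s i y => mem_foldl_body _
      (fun j y => y ∈ PySem.Set.inter (PySem.Set.ofList (pvRng lines i)) (PySem.Set.ofList (pvRng lines j)))
      (fun s j y => PySem.Set.mem_update s _ y) _ s y)
    (PySem.List.pyRange 0 ((lines.length : Int) - 1) 1) PySem.Set.empty x
  refine Iff.trans houter ?_
  simp only [PySem.Set.mem_inter, PySem.Set.mem_ofList, PySem.List.mem_pyRange_one,
    PySem.Set.empty, List.not_mem_nil, false_or]
  constructor
  · rintro ⟨i, ⟨hi0, hi1⟩, j, ⟨hj0, hj1⟩, hxi, hxj⟩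
    refine ⟨i.toNat, j.toNat, by omega, by omega, ?_, ?_⟩
    · exact (mem_pvRng lines i hi0 x).mp hxi
    · exact (mem_pvRng lines j (by omega) x).mp hxj
  · rintro ⟨p, q, hpq, hq, hp', hq'⟩
    refine ⟨(p : Int), ⟨by omega, by omega⟩, (q : Int), ⟨by omega, by omega⟩, ?_, ?_⟩
    · exact (mem_pvRng lines (p : Int) (by omega) x).mpr (by simpa using hp')
    · exact (mem_pvRng lines (q : Int) (by omega) x).mpr (by simpa using hq')

lemma nodup_answer (lines : List (List Int)) :
    ((PySem.List.pyRange 0 ((lines.length : Int) - 1) 1).foldl (fun answer i =>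
      let li := PySem.List.pyGetD lines i []
      let a : PySem.Set Int := PySem.Set.ofList (PySem.List.pyRange (segLo li) (segHi li) 1)
      (PySem.List.pyRange (i + 1) (lines.length : Int) 1).foldl (fun answer j =>
        let lj := PySem.List.pyGetD lines j []
        let b : PySem.Set Int := PySem.Set.ofList (PySem.List.pyRange (segLo lj) (segHi lj) 1)
        PySem.Set.update answer (PySem.Set.inter a b)) answer) PySem.Set.empty).Nodup := by
  refine nodup_foldl_body _ ?_ _ _ List.nodup_nil
  intro s i hs
  refine nodup_foldl_body _ ?_ _ _ hs
  intro s j hs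
  exact PySem.Set.nodup_update _ _ hs

lemma countP_one_iff (p : List Int → Bool) (l : List (List Int)) :
    1 ≤ l.countP p ↔ ∃ k, k < l.length ∧ p (l.getD k []) = true := by
  have h0 : (1 ≤ l.countP p) ↔ 0 < l.countP p := by omega
  rw [h0, List.countP_pos_iff]
  constructor
  · rintro ⟨a, ha, hpa⟩
    obtain ⟨k, hk, rfl⟩ := List.mem_iff_getElem.mp ha
    exact ⟨k, hk, by rwa [List.getD_eq_getElem _ _ hk]⟩
  · rintro ⟨k, hk, hpk⟩
    refine ⟨l.getD k [], ?_, hpk⟩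
    rw [List.getD_eq_getElem _ _ hk]
    exact List.getElem_mem hk

-- two witnesses iff the count is at least 2
lemma countP_two_iff (p : List Int → Bool) (l : List (List Int)) :
    2 ≤ l.countP p ↔
    ∃ i j : Nat, i < j ∧ j < l.length ∧ p (l.getD i []) = true ∧ p (l.getD j []) = true := by
  induction l with
  | nil => simp
  | cons a t ih =>
    rw [List.countP_cons]
    by_cases hp : p a = true
    · rw [if_pos hp]
      have h1 : 2 ≤ t.countP p + 1 ↔ 1 ≤ t.countP p := by omega
      rw [h1, countP_one_iff]
      constructor
      · rintro ⟨k, hk, hkp⟩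
        exact ⟨0, k + 1, by omega, by simp; omega, by simpa using hp, by simpa using hkp⟩
      · rintro ⟨i, j, hij, hj, hi', hj'⟩
        match i, j with
        | _, 0 => omega
        | 0, j + 1 =>
          exact ⟨j, by simp at hj; omega, by simpa using hj'⟩
        | i + 1, j + 1 =>
          exact ⟨i, by simp at hj; omega, by simpa using hi'⟩
    · rw [if_neg hp, Nat.add_zero]
      rw [ih]
      constructor
      · rintro ⟨i, j, hij, hj, hi', hj'⟩
        exact ⟨i + 1, j + 1, by omega, by simp; omega, by simpa using hi', by simpa using hj'⟩
      · rintro ⟨i, j, hij, hj, hi', hj'⟩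
        match i, j with
        | 0, _ => simp only [List.getD_cons_zero] at hi'; exact absurd hi' hp
        | i + 1, 0 => omega
        | i + 1, j + 1 =>
          exact ⟨i, j, by omega, by simp at hj; omega, by simpa using hi', by simpa using hj'⟩


-- A's value: number of distinct points covered by at least two segments
lemma A_eq (lines : List (List Int)) :
    solution lines =
      ((((PySem.Set.ofList (pvPts lines)).filter
          (fun k => decide (2 ≤ (pvPts lines).count k))).length : Nat) : Int) := by
  have hperm : List.Perm
      ((PySem.List.pyRange 0 ((lines.length : Int) - 1) 1).foldl (fun answer i =>
        let li := PySem.List.pyGetD lines i []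
        let a : PySem.Set Int := PySem.Set.ofList (PySem.List.pyRange (segLo li) (segHi li) 1)
        (PySem.List.pyRange (i + 1) (lines.length : Int) 1).foldl (fun answer j =>
          let lj := PySem.List.pyGetD lines j []
          let b : PySem.Set Int := PySem.Set.ofList (PySem.List.pyRange (segLo lj) (segHi lj) 1)
          PySem.Set.update answer (PySem.Set.inter a b)) answer) PySem.Set.empty)
      ((PySem.Set.ofList (pvPts lines)).filter (fun k => decide (2 ≤ (pvPts lines).count k))) := by
    rw [List.perm_ext_iff_of_nodup (nodup_answer lines)
      (List.Nodup.filter _ (PySem.Set.nodup_ofList _))]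
    intro x
    rw [mem_answer lines x, List.mem_filter, ← countP_two_iff (pvCover x) lines, ← count_pvPts]
    constructor
    · intro h2
      have hx : x ∈ pvPts lines := List.count_pos_iff.mp (by omega)
      exact ⟨(PySem.Set.mem_ofList _ _).mpr hx, by simpa using h2⟩
    · rintro ⟨-, h2⟩
      simpa using h2
  unfold solution
  simp only [PySem.Set.len]
  rw [← hperm.length_eq]

-- ===== B-side: the endpoint events and the signed coverage they define =====
def pvEvents (lines : List (List Int)) : List (Int × Int) :=
  lines.flatMap (fun seg =>
    if segLo seg < segHi seg then [(segLo seg, 1), (segHi seg, -1)] else [])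

-- signed coverage of point x read off a list of events
def pvG (ev : List (Int × Int)) (x : Int) : Int :=
  ((ev.filter (fun e => decide (e.1 ≤ x))).map (·.2)).sum

lemma pvG_eq_countP (lines : List (List Int)) (x : Int) :
    pvG (pvEvents lines) x = (lines.countP (pvCover x) : Int) := by
  induction lines with
  | nil => rfl
  | cons seg t ih =>
    simp only [pvEvents, pvG, List.flatMap_cons, List.filter_append, List.map_append,
      List.sum_append, List.countP_cons] at *
    rw [ih]
    by_cases hlt : segLo seg < segHi seg
    · simp only [if_pos hlt]
      unfold pvCover
      by_cases h0 : segLo seg ≤ x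
      · by_cases h1 : segHi seg ≤ x
        · simp [h0, h1]
          try omega
        · simp [h0, h1]
          try omega
      · simp [h0, show ¬ segHi seg ≤ x by omega]
        try omega
    · simp only [if_neg hlt]
      unfold pvCover
      simp [show ¬ (segLo seg ≤ x ∧ x < segHi seg) by omega]

lemma pvG_perm {ev ev' : List (Int × Int)} (h : ev.Perm ev') (x : Int) :
    pvG ev x = pvG ev' x := by
  unfold pvG
  exact ((h.filter _).map _).sum_eq

lemma sum_snd_pvEvents (lines : List (List Int)) :
    ((pvEvents lines).map (·.2)).sum = 0 := by
  induction lines with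
  | nil => rfl
  | cons seg t ih =>
    simp only [pvEvents, List.flatMap_cons, List.map_append, List.sum_append] at *
    rw [ih]
    by_cases hlt : segLo seg < segHi seg <;> simp [hlt]

-- insertion keeps the positions sorted
lemma pairwise_insertBy_fst (x : Int × Int) :
    ∀ l : List (Int × Int), l.Pairwise (fun a b => a.1 ≤ b.1) →
      (PySem.List.insertBy
        (fun a b => decide (a.1 < b.1) || !decide (b.1 < a.1) && decide (a.2 < b.2)) x l).Pairwise
        (fun a b => a.1 ≤ b.1) := by
  intro l
  induction l with
  | nil => intro _; simp [PySem.List.insertBy]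
  | cons y ys ih =>
    intro hp
    rw [List.pairwise_cons] at hp
    show (if (decide (x.1 < y.1) || !decide (y.1 < x.1) && decide (x.2 < y.2)) = true
        then x :: y :: ys else y :: _).Pairwise _
    split_ifs with hb
    · have hxy : x.1 ≤ y.1 := by
        simp only [Bool.or_eq_true, Bool.and_eq_true, Bool.not_eq_true', decide_eq_true_eq,
          decide_eq_false_iff_not] at hb
        omega
      refine List.pairwise_cons.mpr ⟨?_, List.pairwise_cons.mpr hp⟩
      intro z hz
      rcases List.mem_cons.mp hz with rfl | hz
      · exact hxy
      · exact le_trans hxy (hp.1 z hz)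
    · have hyx : y.1 ≤ x.1 := by
        simp only [Bool.or_eq_true, Bool.and_eq_true, Bool.not_eq_true', decide_eq_true_eq,
          decide_eq_false_iff_not] at hb
        omega
      refine List.pairwise_cons.mpr ⟨?_, ih hp.2⟩
      intro z hz
      rcases (PySem.List.mem_insertBy _ _ _ _).mp hz with rfl | hz
      · exact hyx
      · exact hp.1 z hz

lemma pairwise_fst_sorted2 (xs : List (Int × Int)) :
    (PySem.List.sorted2 xs (·.1) (·.2) false).Pairwise (fun a b => a.1 ≤ b.1) := by
  show (xs.foldl (fun acc x => PySem.List.insertBy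
    (fun a b => decide (a.1 < b.1) || !decide (b.1 < a.1) && decide (a.2 < b.2)) x acc) []).Pairwise _
  have main : ∀ (l : List (Int × Int)) (acc : List (Int × Int)),
      acc.Pairwise (fun a b => a.1 ≤ b.1) →
      (l.foldl (fun acc x => PySem.List.insertBy
        (fun a b => decide (a.1 < b.1) || !decide (b.1 < a.1) && decide (a.2 < b.2)) x acc)
        acc).Pairwise (fun a b => a.1 ≤ b.1) := by
    intro l
    induction l with
    | nil => intro acc h; exact h
    | cons a t ih => intro acc h; exact ih _ (pairwise_insertBy_fst a acc h)
  exact main xs [] List.Pairwise.nil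

-- one fold step of the sweep
def pvStep (s : Int × Int × Int) (e : Int × Int) : Int × Int × Int :=
  (if 2 ≤ s.2.1 then s.1 + (e.1 - s.2.2) else s.1, s.2.1 + e.2, e.1)

lemma sweep_correct :
    ∀ (ev : List (Int × Int)), ev.Pairwise (fun a b => a.1 ≤ b.1) →
    ∀ (t c p M : Int), (∀ e ∈ ev, p ≤ e.1) → (∀ e ∈ ev, e.1 ≤ M) →
      c + (ev.map (·.2)).sum ≤ 1 →
      (ev.foldl pvStep (t, c, p)).1 =
        t + (((Finset.Ico p M).filter (fun x => 2 ≤ c + pvG ev x)).card : Int) := by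
  intro ev
  induction ev with
  | nil =>
    intro _ t c p M _ _ hfin
    simp only [List.map_nil, List.sum_nil, add_zero] at hfin
    have : ((Finset.Ico p M).filter (fun x => 2 ≤ c + pvG [] x)) = ∅ := by
      apply Finset.filter_false_of_mem
      intro x _
      unfold pvG
      simp
      omega
    simp [this]
  | cons e rest ih =>
    rintro hsort t c p M hp hM hfin
    rw [List.pairwise_cons] at hsort
    have hpq : p ≤ e.1 := hp e (List.mem_cons_self)
    have hqM : e.1 ≤ M := hM e (List.mem_cons_self)
    have step1 : ((e :: rest).foldl pvStep (t, c, p)) =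
        (rest.foldl pvStep ((if 2 ≤ c then t + (e.1 - p) else t), c + e.2, e.1)) := rfl
    rw [step1, ih hsort.2 _ _ _ M (fun f hf => hsort.1 f hf) (fun f hf => hM f (List.mem_cons_of_mem _ hf))
      (by simp only [List.map_cons, List.sum_cons] at hfin ⊢; omega)]
    -- split the interval at e.1
    have hsplit : Finset.Ico p M = Finset.Ico p e.1 ∪ Finset.Ico e.1 M := by
      rw [Finset.Ico_union_Ico_eq_Ico hpq hqM]
    have hdisj : Disjoint (Finset.Ico p e.1) (Finset.Ico e.1 M) := by
      apply Finset.disjoint_left.mpr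
      intro x hx hx'
      simp only [Finset.mem_Ico] at hx hx'
      omega
    -- coverage below e.1 is c, above it includes e
    have hlow : (Finset.Ico p e.1).filter (fun x => 2 ≤ c + pvG (e :: rest) x) =
        (Finset.Ico p e.1).filter (fun x => 2 ≤ c) := by
      apply Finset.filter_congr
      intro x hx
      simp only [Finset.mem_Ico] at hx
      have hg : pvG (e :: rest) x = 0 := by
        have hnil : (e :: rest).filter (fun f => decide (f.1 ≤ x)) = [] := by
          apply List.filter_eq_nil_iff.mpr
          intro f hf
          rcases List.mem_cons.mp hf with rfl | hf
          · simpa using by omega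
          · have := hsort.1 f hf
            simpa using by omega
        unfold pvG
        rw [hnil]
        rfl
      rw [hg]
      simp
    have hhigh : (Finset.Ico e.1 M).filter (fun x => 2 ≤ c + pvG (e :: rest) x) =
        (Finset.Ico e.1 M).filter (fun x => 2 ≤ c + e.2 + pvG rest x) := by
      apply Finset.filter_congr
      intro x hx
      simp only [Finset.mem_Ico] at hx
      have hg : pvG (e :: rest) x = e.2 + pvG rest x := by
        unfold pvG
        rw [List.filter_cons]
        rw [if_pos (by simpa using hx.1)]
        simp
      rw [hg]
      constructor <;> (intro h; omega)
    have hcards : ((Finset.Ico p M).filter (fun x => 2 ≤ c + pvG (e :: rest) x)).card =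
        ((Finset.Ico p e.1).filter (fun x => 2 ≤ c)).card +
        ((Finset.Ico e.1 M).filter (fun x => 2 ≤ c + e.2 + pvG rest x)).card := by
      rw [hsplit, Finset.filter_union, Finset.card_union_of_disjoint
        (Finset.disjoint_filter_filter hdisj), hlow, hhigh]
    rw [hcards]
    by_cases hc : 2 ≤ c
    · have : ((Finset.Ico p e.1).filter (fun x => 2 ≤ c)).card = (e.1 - p).toNat := by
        rw [Finset.filter_true_of_mem (fun x _ => hc), Int.card_Ico]
      rw [if_pos hc, this]
      push_cast
      omega
    · have : ((Finset.Ico p e.1).filter (fun x => 2 ≤ c)).card = 0 := by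
        rw [Finset.filter_false_of_mem (fun x _ => hc), Finset.card_empty]
      rw [if_neg hc, this]
      push_cast
      omega

lemma pyRange_one_nil {a b : Int} (h : ¬ a < b) : PySem.List.pyRange a b 1 = [] := by
  rw [PySem.List.pyRange_of_pos a b (by norm_num), if_neg h]
  rfl

lemma mem_events_of_cover {lines : List (List Int)} {seg : List Int} {y : Int}
    (hseg : seg ∈ lines) (hc : pvCover y seg = true) :
    (segLo seg, 1) ∈ pvEvents lines ∧ (segHi seg, -1) ∈ pvEvents lines := by
  unfold pvCover at hc
  simp only [decide_eq_true_eq] at hc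
  have hlt : segLo seg < segHi seg := by omega
  constructor
  · exact List.mem_flatMap.mpr ⟨seg, hseg, by rw [if_pos hlt]; simp⟩
  · exact List.mem_flatMap.mpr ⟨seg, hseg, by rw [if_pos hlt]; simp⟩

-- B's value, written against the canonical event list
lemma B_eq (lines : List (List Int)) :
    solution_alt lines =
      ((PySem.List.sorted2 (pvEvents lines) (·.1) (·.2) false).foldl pvStep (0, 0, 0)).1 := by
  have hev : (lines.foldl (fun events seg =>
      if segLo seg < segHi seg then
        events ++ [(segLo seg, 1)] ++ [(segHi seg, -1)]
      else events) ([] : List (Int × Int))) = pvEvents lines := by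
    unfold pvEvents
    have h1 := PySem.List.foldl_congr_mem (l := lines) (init := ([] : List (Int × Int)))
      (f := fun events seg => if segLo seg < segHi seg then
        events ++ [(segLo seg, 1)] ++ [(segHi seg, -1)] else events)
      (g := fun acc seg => acc ++
        (if segLo seg < segHi seg then [(segLo seg, 1), (segHi seg, -1)] else []))
      (by intro acc seg _; by_cases hlt : segLo seg < segHi seg <;> simp [hlt])
    rw [h1, PySem.List.foldl_append_eq_flatMap]
    simp
  calc solution_alt lines
      = ((PySem.List.sorted2 (lines.foldl (fun events seg =>
          if segLo seg < segHi seg then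
            events ++ [(segLo seg, 1)] ++ [(segHi seg, -1)]
          else events) ([] : List (Int × Int))) (·.1) (·.2) false).foldl pvStep (0, 0, 0)).1 := rfl
    _ = _ := by rw [hev]

-- ===== VERDICT (by name: the statement is the Claim_ definition above) =====
theorem solution_spec : Claim_equal_solution := by
  intro lines _ _
  unfold Spec_solution
  rw [A_eq, B_eq]
  have hperm : (PySem.List.sorted2 (pvEvents lines) (·.1) (·.2) false).Perm (pvEvents lines) :=
    PySem.List.sorted2_perm _ _ _ _
  have hpair := pairwise_fst_sorted2 (pvEvents lines)
  rcases hsp : PySem.List.sorted2 (pvEvents lines) (·.1) (·.2) false with _ | ⟨e, rest⟩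
  · -- no events at all: no segment is nonempty, so both sides are 0
    rw [hsp] at hperm
    have hevnil : pvEvents lines = [] := hperm.symm.eq_nil
    have hptsnil : pvPts lines = [] := by
      apply List.flatMap_eq_nil_iff.mpr
      intro seg hseg
      have : ¬ segLo seg < segHi seg := by
        intro hlt
        have : (segLo seg, 1) ∈ pvEvents lines :=
          List.mem_flatMap.mpr ⟨seg, hseg, by rw [if_pos hlt]; simp⟩
        rw [hevnil] at this
        exact absurd this (List.not_mem_nil)
      exact pyRange_one_nil this
    rw [hptsnil]
    rfl
  · rw [hsp] at hperm hpair
    rw [List.pairwise_cons] at hpair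
    -- first fold step: cov = 0 < 2, nothing added
    have step1 : ((e :: rest).foldl pvStep (0, 0, 0)).1 =
        (rest.foldl pvStep (0, e.2, e.1)).1 := by
      show ((rest.foldl pvStep (if (2:Int) ≤ 0 then _ else 0, 0 + e.2, e.1))).1 = _
      norm_num
    rw [step1]
    set M : Int := (e :: rest).foldl (fun acc y => max acc y.1) e.1 with hM
    have hMmax := PySem.List.le_foldl_max_int (e :: rest) (·.1) e.1
    have hfin : e.2 + (rest.map (·.2)).sum ≤ 1 := by
      have h0 : ((pvEvents lines).map (·.2)).sum = 0 := sum_snd_pvEvents lines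
      have : ((e :: rest).map (·.2)).sum = 0 := by rw [(hperm.map _).sum_eq, h0]
      simp only [List.map_cons, List.sum_cons] at this
      omega
    rw [sweep_correct rest hpair.2 0 e.2 e.1 M hpair.1
      (fun f hf => (hMmax.2 f (List.mem_cons_of_mem _ hf))) hfin]
    -- identify the filter with the coverage predicate
    have hpred : (Finset.Ico e.1 M).filter (fun x => 2 ≤ e.2 + pvG rest x) =
        (Finset.Ico e.1 M).filter (fun x => 2 ≤ (lines.countP (pvCover x) : Int)) := by
      apply Finset.filter_congr
      intro x hx
      simp only [Finset.mem_Ico] at hx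
      have hg : e.2 + pvG rest x = pvG (e :: rest) x := by
        unfold pvG
        rw [List.filter_cons, if_pos (by simpa using hx.1)]
        simp
      rw [hg, pvG_perm hperm, pvG_eq_countP]
    rw [hpred]
    -- A's list of points is exactly that finset
    have hnodupF : ((PySem.Set.ofList (pvPts lines)).filter
        (fun k => decide (2 ≤ (pvPts lines).count k))).Nodup :=
      List.Nodup.filter _ (PySem.Set.nodup_ofList _)
    have hsetF : ((PySem.Set.ofList (pvPts lines)).filter
        (fun k => decide (2 ≤ (pvPts lines).count k))).toFinset =
        (Finset.Ico e.1 M).filter (fun x => 2 ≤ (lines.countP (pvCover x) : Int)) := by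
      apply Finset.ext
      intro y
      simp only [List.mem_toFinset, List.mem_filter, Finset.mem_filter, Finset.mem_Ico,
        PySem.Set.mem_ofList, decide_eq_true_eq, count_pvPts]
      constructor
      · rintro ⟨-, h2⟩
        have h1 : 0 < lines.countP (pvCover y) := by omega
        obtain ⟨seg, hseg, hc⟩ := List.countP_pos_iff.mp h1
        obtain ⟨hloMem, hhiMem⟩ := mem_events_of_cover hseg hc
        rw [← hperm.mem_iff] at hloMem hhiMem
        have hcov : segLo seg ≤ y ∧ y < segHi seg := by
          have := hc
          unfold pvCover at this
          simpa using this
        have hylo : e.1 ≤ y := by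
          rcases List.mem_cons.mp hloMem with h | h
          · rw [← h]
            omega
          · have := hpair.1 _ h
            simp only at this
            omega
        have hyhi : y < M := by
          have := hMmax.2 _ hhiMem
          simp only at this
          omega
        exact ⟨⟨hylo, hyhi⟩, by exact_mod_cast h2⟩
      · rintro ⟨-, h2⟩
        have h2' : 2 ≤ lines.countP (pvCover y) := by exact_mod_cast h2
        exact ⟨List.count_pos_iff.mp (by rw [count_pvPts]; omega), h2'⟩
    rw [← hsetF, List.toFinset_card_of_nodup hnodupF]
    ring
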